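-- pv_equiv track=rewrite | github.com/Richard0816/Calcium_imaging_suite2p | brute_force_ops.py | enumerate_all_configs
-- ===== SOURCE A (Python) =====
-- import itertools
--
-- def enumerate_configs(grid: dict) -> list[dict]:
--     axis_names = list(grid.keys())
--     axis_values = [grid[k] for k in axis_names]
--     return [dict(zip(axis_names, combo))
--             for combo in itertools.product(*axis_values)]
--
-- def enumerate_all_configs(sparsery_grid: dict | None,
--                           cellpose_grid: dict | None) -> list[dict]:
--     """Produce the combined config list, each entry tagged with its backend.
--
--     A grid set to None (or empty dict) disables that backend entirely.
--     """
--     out: list[dict] = []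
--     if sparsery_grid:
--         for cfg in enumerate_configs(sparsery_grid):
--             cfg = dict(cfg)
--             cfg['detection_backend'] = 'sparsery'
--             out.append(cfg)
--     if cellpose_grid:
--         for cfg in enumerate_configs(cellpose_grid):
--             cfg = dict(cfg)
--             cfg['detection_backend'] = 'cellpose'
--             out.append(cfg)
--     return out
-- ===== SOURCE B (Python) =====
-- def enumerate_all_configs(sparsery_grid, cellpose_grid):
--     """Mixed-radix enumeration: count the configs, then decode each integer
--     index into one config with div/mod arithmetic (no product list is built)."""
--     out = []
--     for grid, tag in ((sparsery_grid, 'sparsery'), (cellpose_grid, 'cellpose')):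
--         if not grid:
--             continue
--         names = list(grid)
--         values = [grid[k] for k in names]
--         strides, total = _strides(values)
--         for i in range(total):
--             cfg = {k: vs[(i // s) % len(vs)]
--                    for k, vs, s in zip(names, values, strides)}
--             cfg['detection_backend'] = tag
--             out.append(cfg)
--     return out
--
-- def _strides(values):
--     if not values:
--         return [], 1
--     tail, total = _strides(values[1:])
--     return [total] + tail, len(values[0]) * total
-- ===== Notes on version B (the rewrite author's own statement) =====
-- stated objective: alternative
-- what changed: Replaces itertools.product + dict(zip(names, combo)) with mixed-radix index decoding: a recursive helper computes per-axis strides and the total count, then each integer index in range(total) is decoded into one config via (i // stride) % len(axis), so no product list of tuples is ever materialised.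
import Mathlib
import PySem

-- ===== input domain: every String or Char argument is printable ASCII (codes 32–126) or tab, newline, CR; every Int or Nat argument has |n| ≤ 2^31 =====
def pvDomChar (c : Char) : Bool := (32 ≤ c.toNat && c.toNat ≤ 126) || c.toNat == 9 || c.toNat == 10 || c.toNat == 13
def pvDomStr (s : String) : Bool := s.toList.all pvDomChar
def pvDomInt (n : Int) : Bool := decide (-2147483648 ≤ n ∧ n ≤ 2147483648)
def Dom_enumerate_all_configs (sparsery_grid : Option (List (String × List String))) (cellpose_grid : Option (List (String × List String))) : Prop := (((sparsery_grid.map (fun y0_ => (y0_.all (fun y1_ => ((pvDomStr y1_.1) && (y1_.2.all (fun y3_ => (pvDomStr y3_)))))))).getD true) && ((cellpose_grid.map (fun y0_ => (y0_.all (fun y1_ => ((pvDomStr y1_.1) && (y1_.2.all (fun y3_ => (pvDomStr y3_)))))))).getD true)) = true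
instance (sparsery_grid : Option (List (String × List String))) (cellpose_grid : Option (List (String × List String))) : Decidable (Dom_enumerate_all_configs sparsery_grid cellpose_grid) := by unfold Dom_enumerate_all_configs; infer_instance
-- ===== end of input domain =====

-- B replaces itertools.product + dict(zip …) with mixed-radix index decoding (strides + div/mod); objective: alternative algorithm, same cost.


-- ===== PORT A =====
-- itertools.product(*axes): first axis varies slowest, last fastest
def pvProduct (axes : List (List String)) : List (List String) :=
  match axes with
  | [] => [[]]
  | vs :: rest => vs.flatMap (fun v => (pvProduct rest).map (fun combo => v :: combo))

def pvEnumerateConfigs (grid : List (String × List String)) : List (PySem.Dict String String) :=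
  let d : PySem.Dict String (List String) := PySem.Dict.mk grid
  let axis_names := d.keys
  let axis_values := axis_names.map (fun k => d.getD k [])  -- grid[k]; exact since every k comes from grid.keys()
  (pvProduct axis_values).map (fun combo => PySem.Dict.ofList (axis_names.zip combo))

-- 'if grid:' — a None or empty dict is falsy; cfg = dict(cfg) is a copy, then cfg['detection_backend'] = tag
def pvTagAll (grid? : Option (List (String × List String))) (tag : String) : List (List (String × String)) :=
  match grid? with
  | none => []
  | some g =>
      if g.isEmpty then []
      else (pvEnumerateConfigs g).map (fun cfg => ((PySem.Dict.insert cfg "detection_backend" tag)).items)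

def enumerate_all_configs (sparsery_grid : Option (List (String × List String))) (cellpose_grid : Option (List (String × List String))) : List (List (String × String)) :=
  pvTagAll sparsery_grid "sparsery" ++ pvTagAll cellpose_grid "cellpose"

-- ===== PORT B =====
-- _strides(values): recursive helper returning per-axis strides and the total config count
def pvStrides : List (List String) → List Int × Int
  | [] => ([], 1)
  | vs :: rest =>
      let p := pvStrides rest
      (p.2 :: p.1, (vs.length : Int) * p.2)

-- vs[(i // s) % len(vs)]; exact: whenever the range(total) loop runs, total > 0, so every axis is
-- nonempty and every stride positive, and the index is in range (pyGet? is some there)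
def pvAtB (vs : List String) (j : Int) : String := (PySem.List.pyGet? vs j).getD ""

-- the dict-comprehension body: {k: vs[(i // s) % len(vs)] for k, vs, s in zip(names, values, strides)}
def pvDecodeB : List String → List (List String) → List Int → Int → List (String × String)
  | k :: ks, vs :: vss, s :: ss, i =>
      (k, pvAtB vs (PySem.Int.mod (PySem.Int.floordiv i s) (vs.length : Int))) :: pvDecodeB ks vss ss i
  | _, _, _, _ => []

def pvSideB (grid? : Option (List (String × List String))) (tag : String) : List (List (String × String)) :=
  match grid? with
  | none => []
  | some g =>
      if g.isEmpty then []
      else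
        let d : PySem.Dict String (List String) := PySem.Dict.mk g
        let names := d.keys
        let values := names.map (fun k => d.getD k [])
        let p := pvStrides values
        (PySem.List.pyRange 0 p.2 1).map (fun i =>
          ((PySem.Dict.ofList (pvDecodeB names values p.1 i)).insert "detection_backend" tag).items)

def enumerate_all_configs_alt (sparsery_grid : Option (List (String × List String))) (cellpose_grid : Option (List (String × List String))) : List (List (String × String)) :=
  pvSideB sparsery_grid "sparsery" ++ pvSideB cellpose_grid "cellpose"

-- ===== PRECONDITION & SPEC =====
def Spec_enumerate_all_configs (sparsery_grid : Option (List (String × List String))) (cellpose_grid : Option (List (String × List String))) (out : List (List (String × String))) : Prop := out = enumerate_all_configs_alt sparsery_grid cellpose_grid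
instance (sparsery_grid : Option (List (String × List String))) (cellpose_grid : Option (List (String × List String))) (out : List (List (String × String))) : Decidable (Spec_enumerate_all_configs sparsery_grid cellpose_grid out) := by unfold Spec_enumerate_all_configs; infer_instance

-- ===== CLAIM (what is proved, stated in full; the proofs are below) =====
def Claim_equal_enumerate_all_configs : Prop := ∀ (sparsery_grid : Option (List (String × List String))) (cellpose_grid : Option (List (String × List String))), Dom_enumerate_all_configs sparsery_grid cellpose_grid → Spec_enumerate_all_configs sparsery_grid cellpose_grid (enumerate_all_configs sparsery_grid cellpose_grid)

-- ===== LEMMAS AND PROOFS =====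

-- the value part of the decoded row (pvDecodeB without the names)
def pvDecodeV : List (List String) → List Int → Int → List String
  | vs :: vss, s :: ss, i =>
      pvAtB vs (PySem.Int.mod (PySem.Int.floordiv i s) (vs.length : Int)) :: pvDecodeV vss ss i
  | _, _, _ => []

lemma pvDecodeB_eq_zip : ∀ (ks : List String) (vss : List (List String)) (ss : List Int) (i : Int),
    pvDecodeB ks vss ss i = ks.zip (pvDecodeV vss ss i) := by
  intro ks
  induction ks with
  | nil => intro vss ss i; cases vss <;> cases ss <;> rfl
  | cons k ks ih =>
      intro vss ss i
      cases vss with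
      | nil => rfl
      | cons vs vss =>
          cases ss with
          | nil => rfl
          | cons s ss => simp [pvDecodeB, pvDecodeV, ih]

lemma pvStrides_snd_nonneg : ∀ values : List (List String), 0 ≤ (pvStrides values).2 := by
  intro values
  induction values with
  | nil => simp [pvStrides]
  | cons vs rest ih => exact mul_nonneg (by positivity) ih

lemma pvProduct_eq_nil_of_total_zero : ∀ values : List (List String),
    (pvStrides values).2 = 0 → pvProduct values = [] := by
  intro values
  induction values with
  | nil => simp [pvStrides]
  | cons vs rest ih =>
      intro h
      simp only [pvStrides] at h
      rcases mul_eq_zero.mp h with hL | hT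
      · have : vs = [] := List.length_eq_zero_iff.mp (by exact_mod_cast hL)
        simp [pvProduct, this]
      · simp [pvProduct, ih hT]

-- shift invariance: adding a multiple of the total of the remaining axes does not change the decoding
lemma pv_decode_shift : ∀ (values : List (List String)) (q r : Int), 0 ≤ r → r < (pvStrides values).2 →
    pvDecodeV values (pvStrides values).1 (q * (pvStrides values).2 + r)
      = pvDecodeV values (pvStrides values).1 r := by
  intro values
  induction values with
  | nil => intro q r _ _; rfl
  | cons vs rest ih =>
      intro q r hr0 hrT
      set T := (pvStrides rest).2 with hT
      set st := (pvStrides rest).1 with hst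
      set L : Int := (vs.length : Int) with hL
      have hT0 : 0 ≤ T := pvStrides_snd_nonneg rest
      have hTpos : 0 < T := by
        rcases lt_or_eq_of_le hT0 with h | h
        · exact h
        · exfalso
          have : (pvStrides (vs :: rest)).2 = 0 := by simp [pvStrides, ← hT, ← h]
          omega
      have hLpos : 0 < L := by
        by_contra hc
        have hL0 : L = 0 := le_antisymm (by omega) (by positivity)
        have : (pvStrides (vs :: rest)).2 = 0 := by simp [pvStrides, ← hT, ← hL, hL0]
        omega
      have htot : (pvStrides (vs :: rest)).2 = L * T := by simp [pvStrides, ← hT, ← hL]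
      rw [htot] at hrT
      simp only [pvStrides, ← hT, ← hst, ← hL, pvDecodeV]
      congr 1
      · -- head element: the decoded index is the same
        congr 1
        rw [PySem.Int.floordiv_eq_ediv_of_pos hTpos, PySem.Int.floordiv_eq_ediv_of_pos hTpos,
            PySem.Int.mod_eq_emod_of_pos hLpos, PySem.Int.mod_eq_emod_of_pos hLpos]
        have h1 : q * (L * T) + r = r + (q * L) * T := by ring
        rw [h1, Int.add_mul_ediv_right _ _ (by omega), Int.add_mul_emod_self_right]
      · -- tail: both sides decode r's remainder mod T
        have hb0 : 0 ≤ r % T := Int.emod_nonneg r (by omega)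
        have hbT : r % T < T := Int.emod_lt_of_pos r hTpos
        have e1 : q * (L * T) + r = (q * L + r / T) * T + r % T := by
          linarith [Int.mul_ediv_add_emod r T]
        have e2 : r = (r / T) * T + r % T := by
          linarith [Int.mul_ediv_add_emod r T]
        rw [e1, ih _ _ hb0 hbT]
        conv_rhs => rw [e2, ih _ _ hb0 hbT]

-- splitting range (a*b) into a blocks of b
lemma pv_range_mul {α : Type} : ∀ (a b : Nat) (f : Nat → α),
    (List.range (a * b)).map f
      = (List.range a).flatMap (fun q => (List.range b).map (fun r => f (q * b + r))) := by
  intro a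
  induction a with
  | zero => simp
  | succ a ih =>
      intro b f
      have h1 : (a + 1) * b = a * b + b := by ring
      rw [h1, List.range_add, List.range_succ]
      simp [ih, List.map_map, Function.comp_def]

-- looking up every index of vs in order yields vs itself
lemma pv_flatMap_range {α : Type} : ∀ (vs : List String) (g : String → List α),
    (List.range vs.length).flatMap (fun q => g (vs.getD q "")) = vs.flatMap g := by
  intro vs
  induction vs with
  | nil => intro g; rfl
  | cons v vs ih =>
      intro g
      rw [List.length_cons, List.range_succ_eq_map]
      simp only [List.flatMap_cons, List.flatMap_map]
      simp only [List.getD_cons_zero, List.getD_cons_succ]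
      rw [ih]

-- main lemma: decoding every index in range(total) enumerates exactly itertools.product
lemma pv_decode_range : ∀ values : List (List String),
    (PySem.List.pyRange 0 (pvStrides values).2 1).map
        (fun i => pvDecodeV values (pvStrides values).1 i) = pvProduct values := by
  intro values
  induction values with
  | nil => rfl
  | cons vs rest ih =>
      set T := (pvStrides rest).2 with hT
      have hT0 : 0 ≤ T := pvStrides_snd_nonneg rest
      by_cases hTz : T = 0
      · -- some later axis is empty: both sides are []
        have htot : (pvStrides (vs :: rest)).2 = 0 := by simp [pvStrides, ← hT, hTz]
        rw [htot]
        have hnil : pvProduct rest = [] := pvProduct_eq_nil_of_total_zero rest (by omega)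
        have hrhs : pvProduct (vs :: rest) = [] := by
          show vs.flatMap _ = []
          rw [List.flatMap_def, hnil]
          simp
        rw [hrhs]
        simp
      · have hTpos : 0 < T := by omega
        have htot : (pvStrides (vs :: rest)).2 = (vs.length : Int) * T := by
          simp [pvStrides, ← hT]
        have htoN : ((vs.length : Int) * T).toNat = vs.length * T.toNat := by
          rcases Int.eq_ofNat_of_zero_le hT0 with ⟨b, hb⟩
          rw [hb, ← Nat.cast_mul, Int.toNat_natCast, Int.toNat_natCast]
        rw [htot, PySem.List.pyRange_one]
        simp only [sub_zero, htoN, List.map_map, Function.comp_def]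
        rw [pv_range_mul]
        have hblock : ∀ q ∈ List.range vs.length,
            (List.range T.toNat).map (fun r =>
                pvDecodeV (vs :: rest) (pvStrides (vs :: rest)).1 ((0 : Int) + ↑(q * T.toNat + r)))
              = (fun v => (pvProduct rest).map (fun combo => v :: combo)) (vs.getD q "") := by
          intro q hq
          rw [List.mem_range] at hq
          rw [← ih, PySem.List.pyRange_one]
          simp only [sub_zero, List.map_map, Function.comp_def]
          apply List.map_congr_left
          intro r hr
          rw [List.mem_range] at hr
          have hrI0 : (0 : Int) ≤ (r : Int) := by positivity
          have hrIT : (r : Int) < T := by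
            rcases Int.eq_ofNat_of_zero_le hT0 with ⟨b, hb⟩
            rw [hb] at hr ⊢
            exact_mod_cast (by simpa using hr : r < b)
          have hTN : (T.toNat : Int) = T := Int.toNat_of_nonneg hT0
          have hi : ((0 : Int) + ↑(q * T.toNat + r)) = (q : Int) * T + r := by
            push_cast
            rw [hTN]
            ring
          rw [hi]
          show pvDecodeV (vs :: rest) ((pvStrides (vs :: rest)).1) _ = _
          have hfst : (pvStrides (vs :: rest)).1 = T :: (pvStrides rest).1 := by
            simp [pvStrides, ← hT]
          rw [hfst]
          simp only [pvDecodeV]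
          have hdiv : PySem.Int.floordiv ((q : Int) * T + r) T = (q : Int) := by
            rw [PySem.Int.floordiv_eq_ediv_of_pos hTpos]
            rw [add_comm, Int.add_mul_ediv_right _ _ (by omega),
                Int.ediv_eq_zero_of_lt hrI0 hrIT, zero_add]
          have hlenpos : 0 < vs.length := Nat.lt_of_le_of_lt (Nat.zero_le q) hq
          have hmod : PySem.Int.mod (q : Int) ((vs.length : Int)) = (q : Int) := by
            rw [PySem.Int.mod_eq_emod_of_pos (by exact_mod_cast hlenpos)]
            exact Int.emod_eq_of_lt (by positivity) (by exact_mod_cast hq)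
          rw [hdiv, hmod]
          congr 1
          · -- head: vs[q] is looked up
            simp [pvAtB, List.getD_eq_getElem?_getD]
          · -- tail: shift invariance
            rw [zero_add]
            exact pv_decode_shift rest (q : Int) (r : Int) hrI0 hrIT
        rw [List.flatMap_def, List.map_congr_left hblock, ← List.flatMap_def,
            pv_flatMap_range vs (fun v => (pvProduct rest).map (fun combo => v :: combo))]
        rfl

-- per-grid equality of the tagged config lists
lemma pv_side_eq (g? : Option (List (String × List String))) (tag : String) :
    pvTagAll g? tag = pvSideB g? tag := by
  cases g? with
  | none => rfl
  | some g =>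
      simp only [pvTagAll, pvSideB]
      split_ifs with hg
      · rfl
      · simp only [pvEnumerateConfigs]
        rw [← pv_decode_range ((PySem.Dict.mk g).keys.map (fun k => (PySem.Dict.mk g).getD k []))]
        simp only [List.map_map, Function.comp_def, pvDecodeB_eq_zip]

-- ===== VERDICT (by name: the statement is the Claim_ definition above) =====
theorem enumerate_all_configs_spec : Claim_equal_enumerate_all_configs := by
  intro sg cg _hdom
  unfold Spec_enumerate_all_configs enumerate_all_configs enumerate_all_configs_alt
  rw [pv_side_eq sg "sparsery", pv_side_eq cg "cellpose"]
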